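-- pv_equiv track=rewrite | github.com/cytsai2001/myproject1 | [GenEdu5010] Programming and Web Scraping/Exam1/Exam1-4.py | change_the_team
-- ===== SOURCE A (Python) =====
-- def change_the_team(team_started, point_list):
--     change_time = 0
--     if team_started == 'ab':
--         if point_list[0] == 1:
--             change_time += 1
--     elif team_started == 'cd':
--         if point_list[0] == 0:
--             change_time += 1
--     for i in range(len(point_list)-1):
--         if point_list[i] != point_list[i+1]:
--             change_time += 1
--     return change_time
-- ===== SOURCE B (Python) =====
-- def change_the_team(team_started, point_list):
--     # Run-length view: compress the point sequence into its maximal runs;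
--     # the number of team changes during play is (number of runs) - 1.
--     expected_first = {'ab': 1, 'cd': 0}
--     runs = []
--     for x in point_list:
--         if not runs or runs[-1] != x:
--             runs.append(x)
--     changes = len(runs) - 1 if runs else 0
--     if team_started in expected_first and point_list[0] == expected_first[team_started]:
--         changes += 1
--     return changes
-- ===== Notes on version B (the rewrite author's own statement) =====
-- stated objective: alternative
-- what changed: B builds the run-length compression of the point sequence and returns (number of runs - 1) plus a start bonus looked up in a dict of expected first points, instead of A's index loop counting adjacent unequal pairs.
import Mathlib
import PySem

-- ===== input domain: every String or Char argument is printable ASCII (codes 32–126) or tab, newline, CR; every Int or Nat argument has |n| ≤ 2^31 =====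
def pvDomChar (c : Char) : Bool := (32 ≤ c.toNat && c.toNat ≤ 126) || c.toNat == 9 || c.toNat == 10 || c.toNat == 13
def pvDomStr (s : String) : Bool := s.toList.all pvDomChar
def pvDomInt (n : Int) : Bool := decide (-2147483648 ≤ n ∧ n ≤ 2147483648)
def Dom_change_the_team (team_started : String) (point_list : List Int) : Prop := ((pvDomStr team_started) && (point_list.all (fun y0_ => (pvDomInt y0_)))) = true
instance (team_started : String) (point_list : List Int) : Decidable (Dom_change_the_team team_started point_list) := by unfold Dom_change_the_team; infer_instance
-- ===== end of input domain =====

-- B compresses the point sequence into its maximal runs and returns (#runs - 1) plus the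
-- start bonus from a dict of expected first points, instead of counting adjacent unequal
-- pairs by index as A does (objective: alternative).

-- ===== PORT A =====
def change_the_team (team_started : String) (point_list : List Int) : Int :=
  let change_time : Int := 0
  let change_time : Int :=
    if team_started = "ab" then
      (if PySem.List.pyGetD point_list 0 0 = 1 then change_time + 1 else change_time)
    else if team_started = "cd" then
      (if PySem.List.pyGetD point_list 0 0 = 0 then change_time + 1 else change_time)
    else change_time
  (PySem.List.pyRange 0 ((point_list.length : Int) - 1) 1).foldl
    (fun acc i =>
      if PySem.List.pyGetD point_list i 0 ≠ PySem.List.pyGetD point_list (i + 1) 0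
      then acc + 1 else acc) change_time

-- ===== PORT B =====
def change_the_team_alt (team_started : String) (point_list : List Int) : Int :=
  let expected_first : PySem.Dict String Int := PySem.Dict.ofList [("ab", 1), ("cd", 0)]
  let runs : List Int := point_list.foldl
    (fun runs x =>
      if runs = [] ∨ PySem.List.pyGetD runs (-1) 0 ≠ x then runs ++ [x] else runs) []
  let changes : Int := if runs ≠ [] then (runs.length : Int) - 1 else 0
  if expected_first.contains team_started ∧
     PySem.List.pyGetD point_list 0 0 = expected_first.getD team_started 0
  then changes + 1 else changes

-- ===== PRECONDITION & SPEC =====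
-- A (and B) index point_list[0] when the team is 'ab' or 'cd'; Pre_ excludes exactly the
-- inputs where that raises IndexError (empty list with those teams).
def Pre_change_the_team (team_started : String) (point_list : List Int) : Prop :=
  (team_started = "ab" ∨ team_started = "cd") → point_list ≠ []
instance (team_started : String) (point_list : List Int) : Decidable (Pre_change_the_team team_started point_list) := by unfold Pre_change_the_team; infer_instance
def pvWitness_change_the_team : String × List Int := ("ab", [1, 0, 0])
def Spec_change_the_team (team_started : String) (point_list : List Int) (out : Int) : Prop := out = change_the_team_alt team_started point_list
instance (team_started : String) (point_list : List Int) (out : Int) : Decidable (Spec_change_the_team team_started point_list out) := by unfold Spec_change_the_team; infer_instance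

-- ===== CLAIM (what is proved, stated in full; the proofs are below) =====
def Claim_equal_change_the_team : Prop := ∀ (team_started : String) (point_list : List Int), Dom_change_the_team team_started point_list → Pre_change_the_team team_started point_list → Spec_change_the_team team_started point_list (change_the_team team_started point_list)

-- ===== LEMMAS AND PROOFS =====

-- number of adjacent changes given a previous value
def pvCntN (prev : Int) : List Int → Nat
  | [] => 0
  | x :: rest => (if prev ≠ x then 1 else 0) + pvCntN x rest

-- B's run-building step
def pvStep (runs : List Int) (x : Int) : List Int :=
  if runs = [] ∨ PySem.List.pyGetD runs (-1) 0 ≠ x then runs ++ [x] else runs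

theorem pvRunsLen : ∀ (xs acc : List Int) (a : Int),
    (xs.foldl pvStep (acc ++ [a])).length = acc.length + 1 + pvCntN a xs := by
  intro xs
  induction xs with
  | nil => intro acc a; simp [pvCntN]
  | cons x rest ih =>
    intro acc a
    simp only [List.foldl_cons]
    have hlast : PySem.List.pyGetD (acc ++ [a]) (-1) 0 = a :=
      PySem.List.pyGetD_neg_one_append_singleton acc a 0
    by_cases hax : a = x
    · have hstep : pvStep (acc ++ [a]) x = acc ++ [a] := by
        simp [pvStep, hax]
      rw [hstep, ih acc a]
      simp [pvCntN, hax]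
    · have hstep : pvStep (acc ++ [a]) x = (acc ++ [a]) ++ [x] := by
        simp [pvStep, hlast, hax]
      rw [hstep, ih (acc ++ [a]) x]
      simp [pvCntN, hax]
      omega

theorem pvZipCnt : ∀ (rest : List Int) (x : Int) (c : Int),
    ((x :: rest).zip rest).foldl
      (fun acc p => if p.1 ≠ p.2 then acc + 1 else acc) c
    = c + (pvCntN x rest : Int) := by
  intro rest
  induction rest with
  | nil => intro x c; simp [pvCntN]
  | cons y t ih =>
    intro x c
    simp only [List.zip_cons_cons, List.foldl_cons]
    rw [ih y]
    by_cases h : x = y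
    · simp [pvCntN, h]
    · simp only [pvCntN]
      simp [h]
      omega

theorem pvRangeMapPair : ∀ pl : List Int,
    (List.range (pl.length - 1)).map (fun k => (pl.getD k 0, pl.getD (k + 1) 0))
      = pl.zip pl.tail := by
  intro pl
  induction pl with
  | nil => simp
  | cons x t ih =>
    cases t with
    | nil => simp
    | cons y rest =>
      simp only [List.length_cons, Nat.add_sub_cancel, List.range_succ_eq_map,
        List.map_cons, List.map_map]
      simp only [List.length_cons, Nat.add_sub_cancel] at ih
      simp only [List.tail_cons, List.zip_cons_cons]
      simp only [List.tail_cons] at ih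
      have hcomp : ((fun k => ((x :: y :: rest).getD k 0, (x :: y :: rest).getD (k + 1) 0)) ∘ Nat.succ)
          = (fun k => ((y :: rest).getD k 0, (y :: rest).getD (k + 1) 0)) := by
        funext k; simp [Function.comp, List.getD]
      rw [hcomp, ih]
      simp [List.getD]

theorem pvAloop (pl : List Int) (c : Int) :
    (PySem.List.pyRange 0 ((pl.length : Int) - 1) 1).foldl
      (fun acc i =>
        if PySem.List.pyGetD pl i 0 ≠ PySem.List.pyGetD pl (i + 1) 0
        then acc + 1 else acc) c
    = (pl.zip pl.tail).foldl (fun acc p => if p.1 ≠ p.2 then acc + 1 else acc) c := by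
  cases pl with
  | nil => simp [PySem.List.pyRange_one_eq_nil]
  | cons x t =>
    have hlen : ((x :: t).length : Int) - 1 = (((x :: t).length - 1 : Nat) : Int) := by
      simp only [List.length_cons]; omega
    rw [hlen, PySem.List.pyRange_one, List.foldl_map]
    simp only [Int.sub_zero, Int.toNat_natCast]
    have hfe2 : (fun (acc : Int) (k : Nat) =>
        if PySem.List.pyGetD (x :: t) ((0 : Int) + (k : Int)) 0 ≠
           PySem.List.pyGetD (x :: t) ((0 : Int) + (k : Int) + 1) 0
        then acc + 1 else acc)
        = (fun acc k => if (x :: t).getD k 0 ≠ (x :: t).getD (k + 1) 0 then acc + 1 else acc) := by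
      funext acc k
      have h2 : ((k : Int)) + 1 = (((k + 1 : Nat)) : Int) := by omega
      have h3 : PySem.List.pyGetD (x :: t) ((k : Int) + 1) 0 = (x :: t).getD (k + 1) 0 := by
        rw [h2, PySem.List.pyGetD_natCast]
      have h4 : PySem.List.pyGetD (x :: t) ((0 : Int) + (k : Int)) 0 = (x :: t).getD k 0 := by
        rw [show (0 : Int) + (k : Int) = ((k : Nat) : Int) from by ring, PySem.List.pyGetD_natCast]
      rw [show (0 : Int) + (k : Int) + 1 = (k : Int) + 1 from by ring, h4, h3]
    rw [hfe2]
    have hmapfold :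
        (List.range ((x :: t).length - 1)).foldl
          (fun acc k => if (x :: t).getD k 0 ≠ (x :: t).getD (k + 1) 0 then acc + 1 else acc) c
      = ((List.range ((x :: t).length - 1)).map
          (fun k => ((x :: t).getD k 0, (x :: t).getD (k + 1) 0))).foldl
          (fun acc p => if p.1 ≠ p.2 then acc + 1 else acc) c := by
      rw [List.foldl_map]
    rw [hmapfold, pvRangeMapPair]

-- B's changes value on a nonempty list is the adjacent-change count
theorem pvBchanges (x : Int) (rest : List Int) :
    (if ((x :: rest).foldl pvStep []) ≠ [] then
       ((((x :: rest).foldl pvStep []).length : Int) - 1) else 0)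
    = (pvCntN x rest : Int) := by
  have h0 : (x :: rest).foldl pvStep [] = rest.foldl pvStep ([] ++ [x]) := by
    simp [pvStep]
  have hl := pvRunsLen rest [] x
  rw [h0]
  have hne : rest.foldl pvStep ([] ++ [x]) ≠ [] := by
    intro h
    rw [h] at hl
    simp only [List.length_nil] at hl
    omega
  rw [if_pos hne, hl]
  simp

-- ===== VERDICT (by name: the statement is the Claim_ definition above) =====
theorem change_the_team_spec : Claim_equal_change_the_team := by
  intro t pl _ pre
  unfold Spec_change_the_team change_the_team change_the_team_alt
  rw [pvAloop]
  have hstep : (fun (runs : List Int) (x : Int) =>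
      if runs = [] ∨ PySem.List.pyGetD runs (-1) 0 ≠ x then runs ++ [x] else runs) = pvStep := rfl
  rw [hstep]
  have hofl : PySem.Dict.ofList [("ab", (1 : Int)), ("cd", 0)]
      = PySem.Dict.mk [("ab", 1), ("cd", 0)] := by decide
  rw [hofl]
  by_cases hab : t = "ab"
  · subst hab
    obtain ⟨x, rest, rfl⟩ : ∃ x rest, pl = x :: rest := by
      cases pl with
      | nil => exact absurd rfl (pre (Or.inl rfl))
      | cons x rest => exact ⟨x, rest, rfl⟩
    simp only [List.tail_cons]
    rw [pvZipCnt rest x, pvBchanges x rest, PySem.List.pyGetD_zero_cons]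
    simp only [PySem.Dict.contains_mk, PySem.Dict.getD_eq_get?_getD, PySem.Dict.get?_mk_cons]
    simp
    split_ifs <;> omega
  · by_cases hcd : t = "cd"
    · subst hcd
      obtain ⟨x, rest, rfl⟩ : ∃ x rest, pl = x :: rest := by
        cases pl with
        | nil => exact absurd rfl (pre (Or.inr rfl))
        | cons x rest => exact ⟨x, rest, rfl⟩
      simp only [List.tail_cons]
      rw [pvZipCnt rest x, pvBchanges x rest, PySem.List.pyGetD_zero_cons]
      simp only [PySem.Dict.contains_mk, PySem.Dict.getD_eq_get?_getD, PySem.Dict.get?_mk_cons]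
      simp [hab]
      split_ifs <;> omega
    · cases pl with
      | nil =>
        simp [PySem.Dict.contains_mk, hab, hcd]
        rintro (h | h)
        · exact absurd h.symm hab
        · exact absurd h.symm hcd
      | cons x rest =>
        simp only [List.tail_cons]
        rw [pvZipCnt rest x, pvBchanges x rest]
        simp only [PySem.Dict.contains_mk, List.any_cons, List.any_nil]
        simp [hab, hcd]
        rintro (h | h)
        · exact absurd h.symm hab
        · exact absurd h.symm hcd
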